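-- pv_equiv track=rewrite | github.com/tonniewhood/AdventOfCode | Day 10/puzzle2.py | findHighestAndLowestColumn
-- ===== SOURCE A (Python) =====
-- def findHighestAndLowestColumn(pipeLoop) -> tuple:
--
--     highestColumn = 0
--     lowestColumn = 0
--
--     for pipeTuple in pipeLoop:
--         if pipeTuple[1] > highestColumn:
--             highestColumn = pipeTuple[1]
--         if pipeTuple[1] < lowestColumn:
--             lowestColumn = pipeTuple[1]
--
--     return (highestColumn, lowestColumn)
-- ===== SOURCE B (Python) =====
-- def findHighestAndLowestColumn(pipeLoop) -> tuple:
--     if not pipeLoop: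
--         return (0, 0)
--     s = sorted(t[1] for t in pipeLoop)
--     return (max(0, s[-1]), min(0, s[0]))
-- ===== Notes on version B (the rewrite author's own statement) =====
-- stated objective: alternative
-- what changed: Instead of one scan with two coupled accumulators, B sorts the column values once and reads the extremes off the sorted list's endpoints, clamping each against 0 with a single max/min.
import Mathlib
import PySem

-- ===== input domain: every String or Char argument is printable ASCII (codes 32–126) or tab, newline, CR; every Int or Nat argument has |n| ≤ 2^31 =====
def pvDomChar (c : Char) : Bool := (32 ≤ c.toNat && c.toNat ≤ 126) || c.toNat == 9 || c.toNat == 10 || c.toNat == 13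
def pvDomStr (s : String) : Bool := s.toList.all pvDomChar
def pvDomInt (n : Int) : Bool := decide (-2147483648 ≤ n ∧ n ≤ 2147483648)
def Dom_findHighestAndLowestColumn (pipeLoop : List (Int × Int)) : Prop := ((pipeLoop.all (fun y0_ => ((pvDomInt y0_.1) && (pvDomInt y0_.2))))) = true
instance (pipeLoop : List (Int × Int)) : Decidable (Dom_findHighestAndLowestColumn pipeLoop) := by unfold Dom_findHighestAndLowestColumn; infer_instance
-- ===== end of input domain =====

-- ===== PORT A =====
-- A: one scan carrying two coupled accumulators; B below sorts the columns once and reads the extremes off the endpoints (alternative algorithm, same result).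
def findHighestAndLowestColumn (pipeLoop : List (Int × Int)) : Int × Int :=
  pipeLoop.foldl
    (fun st pipeTuple =>
      let highestColumn := if pipeTuple.2 > st.1 then pipeTuple.2 else st.1
      let lowestColumn := if pipeTuple.2 < st.2 then pipeTuple.2 else st.2
      (highestColumn, lowestColumn))
    (0, 0)

-- ===== PORT B =====
-- s[-1] / s[0] on the nonempty sorted list are rendered as getLast?/head? with default 0 (never reached).
def findHighestAndLowestColumn_alt (pipeLoop : List (Int × Int)) : Int × Int :=
  if pipeLoop.isEmpty then (0, 0)
  else
    let s := PySem.List.sorted (pipeLoop.map (fun t => t.2)) (fun x => x) false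
    (max 0 (s.getLast?.getD 0), min 0 (s.head?.getD 0))

-- ===== PRECONDITION & SPEC =====
def Spec_findHighestAndLowestColumn (pipeLoop : List (Int × Int)) (out : Int × Int) : Prop := out = findHighestAndLowestColumn_alt pipeLoop
instance (pipeLoop : List (Int × Int)) (out : Int × Int) : Decidable (Spec_findHighestAndLowestColumn pipeLoop out) := by unfold Spec_findHighestAndLowestColumn; infer_instance

-- ===== CLAIM =====
def Claim_equal_findHighestAndLowestColumn : Prop := ∀ (pipeLoop : List (Int × Int)), Dom_findHighestAndLowestColumn pipeLoop → Spec_findHighestAndLowestColumn pipeLoop (findHighestAndLowestColumn pipeLoop)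

-- ===== LEMMAS AND PROOFS =====

theorem pv_fold_pair (l : List (Int × Int)) (a b : Int) :
    l.foldl
      (fun st pipeTuple =>
        let highestColumn := if pipeTuple.2 > st.1 then pipeTuple.2 else st.1
        let lowestColumn := if pipeTuple.2 < st.2 then pipeTuple.2 else st.2
        (highestColumn, lowestColumn))
      (a, b)
    = ((l.map (fun t => t.2)).foldl max a, (l.map (fun t => t.2)).foldl min b) := by
  induction l generalizing a b with
  | nil => rfl
  | cons x xs ih =>
    simp only [List.foldl, List.map]
    have h1 : (if x.2 > a then x.2 else a) = max a x.2 := by split_ifs <;> omega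
    have h2 : (if x.2 < b then x.2 else b) = min b x.2 := by split_ifs <;> omega
    rw [h1, h2]
    exact ih _ _

theorem pv_le_foldl_max (l : List Int) (a : Int) : a ≤ l.foldl max a := by
  induction l generalizing a with
  | nil => simp
  | cons x xs ih => exact le_trans (le_max_left a x) (ih _)

theorem pv_mem_le_foldl_max (l : List Int) (a x : Int) (hx : x ∈ l) : x ≤ l.foldl max a := by
  induction l generalizing a with
  | nil => simp at hx
  | cons y ys ih =>
    rcases List.mem_cons.mp hx with h | h
    · subst h; exact le_trans (le_max_right a x) (pv_le_foldl_max ys _)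
    · exact ih _ h

theorem pv_foldl_max_le (l : List Int) (a c : Int) (ha : a ≤ c) (hc : ∀ x ∈ l, x ≤ c) :
    l.foldl max a ≤ c := by
  induction l generalizing a with
  | nil => simpa using ha
  | cons y ys ih =>
    exact ih _ (max_le ha (hc y (List.mem_cons_self))) (fun x hx => hc x (List.mem_cons_of_mem _ hx))

theorem pv_foldl_min_le (l : List Int) (a : Int) : l.foldl min a ≤ a := by
  induction l generalizing a with
  | nil => simp
  | cons x xs ih => exact le_trans (ih _) (min_le_left a x)

theorem pv_foldl_min_le_mem (l : List Int) (a x : Int) (hx : x ∈ l) : l.foldl min a ≤ x := by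
  induction l generalizing a with
  | nil => simp at hx
  | cons y ys ih =>
    rcases List.mem_cons.mp hx with h | h
    · subst h; exact le_trans (pv_foldl_min_le ys _) (min_le_right a x)
    · exact ih _ h

theorem pv_le_foldl_min (l : List Int) (a c : Int) (ha : c ≤ a) (hc : ∀ x ∈ l, c ≤ x) :
    c ≤ l.foldl min a := by
  induction l generalizing a with
  | nil => simpa using ha
  | cons y ys ih =>
    exact ih _ (le_min ha (hc y (List.mem_cons_self))) (fun x hx => hc x (List.mem_cons_of_mem _ hx))

theorem pv_last_ge (s : List Int) (hp : s.Pairwise (· ≤ ·)) :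
    ∀ x ∈ s, x ≤ s.getLast?.getD 0 := by
  induction s with
  | nil => simp
  | cons a t ih =>
    intro x hx
    rcases List.pairwise_cons.mp hp with ⟨ha, hpt⟩
    cases t with
    | nil => simp at hx; simp [hx]
    | cons b u =>
      have hlast : (a :: b :: u).getLast?.getD 0 = (b :: u).getLast?.getD 0 := by
        simp [List.getLast?]
      rw [hlast]
      rcases List.mem_cons.mp hx with h | h
      · subst h
        exact le_trans (ha b (List.mem_cons_self)) (ih hpt b (List.mem_cons_self))
      · exact ih hpt x h

theorem pv_head_le (s : List Int) (hp : s.Pairwise (· ≤ ·)) :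
    ∀ x ∈ s, s.head?.getD 0 ≤ x := by
  cases s with
  | nil => simp
  | cons a t =>
    intro x hx
    rcases List.pairwise_cons.mp hp with ⟨ha, _⟩
    rcases List.mem_cons.mp hx with h | h
    · simp [h]
    · simpa using ha x h

theorem pv_last_mem (s : List Int) (hs : s ≠ []) : s.getLast?.getD 0 ∈ s := by
  rw [List.getLast?_eq_getLast hs]
  exact List.getLast_mem hs

theorem pv_head_mem (s : List Int) (hs : s ≠ []) : s.head?.getD 0 ∈ s := by
  cases s with
  | nil => exact absurd rfl hs
  | cons a t => simp

-- ===== VERDICT =====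
theorem findHighestAndLowestColumn_spec : Claim_equal_findHighestAndLowestColumn := by
  intro l _
  unfold Spec_findHighestAndLowestColumn findHighestAndLowestColumn findHighestAndLowestColumn_alt
  rw [pv_fold_pair]
  by_cases hl : l = []
  · subst hl; rfl
  · have hne : l.isEmpty = false := by simpa [List.isEmpty_iff] using hl
    rw [hne]
    simp only [Bool.false_eq_true, if_false]
    set cols := l.map (fun t => t.2) with hcols
    set s := PySem.List.sorted cols (fun x => x) false with hs
    have hcne : cols ≠ [] := by simp [hcols, hl]
    have hsne : s ≠ [] := by
      intro h
      exact hcne ((PySem.List.sorted_eq_nil_iff _ _ _).mp h)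
    have hpw : s.Pairwise (· ≤ ·) := by
      simpa using PySem.List.sorted_pairwise cols (fun x => x)
    have hmem : ∀ x, x ∈ s ↔ x ∈ cols := fun x => PySem.List.mem_sorted cols (fun x => x) false x
    refine Prod.ext ?_ ?_
    · -- max side
      apply le_antisymm
      · exact pv_foldl_max_le cols 0 _ (le_max_left _ _)
          (fun x hx => le_trans (pv_last_ge s hpw x ((hmem x).mpr hx)) (le_max_right _ _))
      · exact max_le (pv_le_foldl_max cols 0)
          (pv_mem_le_foldl_max cols 0 _ ((hmem _).mp (pv_last_mem s hsne)))
    · -- min side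
      apply le_antisymm
      · exact le_min (pv_foldl_min_le cols 0)
          (pv_foldl_min_le_mem cols 0 _ ((hmem _).mp (pv_head_mem s hsne)))
      · exact pv_le_foldl_min cols 0 _ (min_le_left _ _)
          (fun x hx => le_trans (min_le_right _ _) (pv_head_le s hpw x ((hmem x).mpr hx)))
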